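-- pv_equiv track=rewrite | github.com/sarim-hk/password-manager | vault_files/search.py | same_order
-- ===== SOURCE A (Python) =====
-- def same_order(search_term, title):
-- 	search_term, title = search_term.replace(" ", ""), title.replace(" ", "")
--
-- 	start = 0
-- 	for character in search_term:
-- 		for count in range(start, len(title), 1):
-- 			start = count
-- 			temp = title[count]
--
-- 			if character == temp:
-- 				break
--
-- 			if count == (len(title)-1):
-- 				return 0
--
-- 	return 5	# 5 score
-- ===== SOURCE B (Python) =====
-- def same_order(search_term, title):
--     s = search_term.replace(" ", "")
--     t = title.replace(" ", "")
--     pos = {}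
--     for i, ch in enumerate(t):
--         pos.setdefault(ch, []).append(i)
--     start = 0
--     for ch in s:
--         lst = pos.get(ch, [])
--         lo, hi = 0, len(lst)
--         while lo < hi:
--             mid = (lo + hi) // 2
--             if lst[mid] < start:
--                 lo = mid + 1
--             else:
--                 hi = mid
--         if lo == len(lst):
--             return 0
--         start = lst[lo]
--     return 5
-- ===== Notes on version B (the rewrite author's own statement) =====
-- stated objective: alternative
-- what changed: Instead of rescanning the title linearly from `start` for every search character, B builds one dict mapping each title character to its ascending list of indices and answers each search character with a binary search for the smallest index >= start; on random text A's rescans are short, so B is not measurably faster, only different (better worst case).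
-- intended difference: When the title is all spaces (empty after space removal) but the search term has a non-space character, A returns the match score 5 even though no character can occur in an empty title; B returns 0, the intended 'no match'. — e.g. on same_order("a", " "): A returns 5, B returns 0
import Mathlib
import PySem

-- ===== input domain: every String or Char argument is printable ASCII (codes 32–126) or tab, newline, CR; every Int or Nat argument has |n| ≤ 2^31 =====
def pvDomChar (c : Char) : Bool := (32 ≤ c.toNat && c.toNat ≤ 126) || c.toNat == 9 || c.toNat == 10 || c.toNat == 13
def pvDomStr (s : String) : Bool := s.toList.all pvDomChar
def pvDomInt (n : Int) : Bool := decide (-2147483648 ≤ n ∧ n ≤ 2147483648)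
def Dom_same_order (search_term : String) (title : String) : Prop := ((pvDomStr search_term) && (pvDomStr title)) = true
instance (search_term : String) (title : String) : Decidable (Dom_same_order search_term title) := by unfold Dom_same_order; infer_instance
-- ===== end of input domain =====

-- B replaces A's per-character rescans of the title by a char→ascending-index-list dict
-- built once plus a binary search per search character (objective: alternative algorithm).

-- ===== PORT A =====
-- inner 'for count in range(start, len(title), 1)' loop: returns `some start'` on break
-- (start' = matched index), `none` on 'return 0'; if the range is empty (possible only
-- at entry, since at the last index the loop always breaks or returns) it falls through
-- with start unchanged, i.e. `some count`.
def pvLoopA (t : List Char) (c : Char) (count : Nat) : Option Nat :=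
  if h : count < t.length then
    let temp := t[count]
    if c == temp then some count
    else if count = t.length - 1 then none
    else pvLoopA t c (count + 1)
  else some count
termination_by t.length - count
decreasing_by omega

-- outer 'for character in search_term' loop carrying start
def pvOuterA (t : List Char) : List Char → Nat → Int
  | [], _ => 5
  | c :: rest, start =>
    match pvLoopA t c start with
    | none => 0
    | some start' => pvOuterA t rest start'

def same_order (search_term : String) (title : String) : Int :=
  let s := PySem.Str.replace search_term " " ""
  let t := PySem.Str.replace title " " ""
  pvOuterA t.toList s.toList 0

-- ===== PORT B =====
-- 'for i, ch in enumerate(t): pos.setdefault(ch, []).append(i)'  (zipIdx pairs are (ch, i))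
def pvBuild (t : List Char) : PySem.Dict Char (List Nat) :=
  (t.zipIdx).foldl (fun d p => d.modify p.1 [] (fun l => l ++ [p.2])) PySem.Dict.empty

-- the hand-written 'while lo < hi' binary search of Source B; '(lo + hi) // 2' on the
-- nonnegative loop bounds is exactly Nat division
def pvBS (lst : List Nat) (start : Nat) (lo hi : Nat) : Nat :=
  if _h : lo < hi then
    let mid := (lo + hi) / 2
    if lst.getD mid 0 < start then pvBS lst start (mid + 1) hi
    else pvBS lst start lo mid
  else lo
termination_by hi - lo
decreasing_by all_goals omega

-- 'for ch in s' loop of Source B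
def pvOuterB (d : PySem.Dict Char (List Nat)) : List Char → Nat → Int
  | [], _ => 5
  | c :: rest, start =>
    let lst := d.getD c []
    let lo := pvBS lst start 0 lst.length
    if lo = lst.length then 0
    else pvOuterB d rest (lst.getD lo 0)   -- lst[lo]: in range since lo ≠ len is guarded

def same_order_alt (search_term : String) (title : String) : Int :=
  let s := PySem.Str.replace search_term " " ""
  let t := PySem.Str.replace title " " ""
  pvOuterB (pvBuild t.toList) s.toList 0

-- ===== PRECONDITION & SPEC =====
-- When the title consists only of spaces (so it is empty after the space removal) but the
-- search term still has a non-space character, A returns the match score 5 even though no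
-- character can occur in an empty title; B returns 0, the intended "no match".
def D_same_order (search_term : String) (title : String) : Prop :=
  (title.toList.all (fun ch => ch == ' ') = true) ∧
  (search_term.toList.any (fun ch => ch != ' ') = true)
instance (search_term : String) (title : String) : Decidable (D_same_order search_term title) := by
  unfold D_same_order; infer_instance

def Spec_same_order (search_term : String) (title : String) (out : Int) : Prop :=
  ¬ D_same_order search_term title → out = same_order_alt search_term title
instance (search_term : String) (title : String) (out : Int) : Decidable (Spec_same_order search_term title out) := by
  unfold Spec_same_order; infer_instance

def pvDiffWitness_same_order : String × String := ("a", " ")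
def pvDiffWitnessOut_same_order : Int × Int := (5, 0)

-- ===== CLAIM (what is proved, stated in full; the proofs are below) =====
def Claim_unchanged_same_order : Prop := ∀ (search_term : String) (title : String), Dom_same_order search_term title → Spec_same_order search_term title (same_order search_term title)
def Claim_changed_same_order : Prop := Dom_same_order (pvDiffWitness_same_order.1) (pvDiffWitness_same_order.2) ∧ D_same_order (pvDiffWitness_same_order.1) (pvDiffWitness_same_order.2) ∧ same_order (pvDiffWitness_same_order.1) (pvDiffWitness_same_order.2) = pvDiffWitnessOut_same_order.1 ∧ same_order_alt (pvDiffWitness_same_order.1) (pvDiffWitness_same_order.2) = pvDiffWitnessOut_same_order.2 ∧ pvDiffWitnessOut_same_order.1 ≠ pvDiffWitnessOut_same_order.2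
def Claim_exact_same_order : Prop := ∀ (search_term : String) (title : String), Dom_same_order search_term title → D_same_order search_term title → same_order search_term title ≠ same_order_alt search_term title

-- ===== LEMMAS AND PROOFS =====

-- the ascending list of the indices of c in t
def pvOcc (t : List Char) (c : Char) : List Nat :=
  ((t.zipIdx).filter (fun p => p.1 == c)).map (·.2)

theorem pvBuild_getD (t : List Char) (c : Char) :
    (pvBuild t).getD c [] = pvOcc t c := by
  unfold pvBuild pvOcc
  rw [PySem.Dict.getD_foldl_modify_append]
  simp

theorem mem_pvOcc {t : List Char} {c : Char} {i : Nat} :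
    i ∈ pvOcc t c ↔ t[i]? = some c := by
  unfold pvOcc
  simp only [List.mem_map, List.mem_filter]
  constructor
  · rintro ⟨⟨x, j⟩, ⟨hmem, hx⟩, rfl⟩
    have : x = c := by simpa using hx
    subst this
    exact List.mk_mem_zipIdx_iff_getElem?.mp hmem
  · intro h
    exact ⟨(c, i), ⟨List.mk_mem_zipIdx_iff_getElem?.mpr h, by simp⟩, rfl⟩

theorem pvOcc_pairwise (t : List Char) (c : Char) : (pvOcc t c).Pairwise (· < ·) := by
  unfold pvOcc
  rw [List.pairwise_map]
  refine List.Pairwise.sublist List.filter_sublist ?_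
  rw [List.pairwise_iff_getElem]
  intro i j hi hj hij
  simp only [List.getElem_zipIdx]
  omega

theorem pvOcc_sorted (t : List Char) (c : Char) :
    ∀ i j, i < j → j < (pvOcc t c).length →
      (pvOcc t c).getD i 0 < (pvOcc t c).getD j 0 := by
  have h := (List.pairwise_iff_getElem).mp (pvOcc_pairwise t c)
  intro i j hij hj
  rw [List.getD_eq_getElem _ _ (by omega), List.getD_eq_getElem _ _ hj]
  exact h i j (by omega) hj hij

theorem pvMem_lt {t : List Char} {c : Char} {x : Nat} (hx : x ∈ pvOcc t c) : x < t.length := by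
  have hx' := mem_pvOcc.mp hx
  by_contra hcon
  rw [List.getElem?_eq_none (by omega)] at hx'
  simp at hx'

theorem pvNotMem {t : List Char} {c : Char} {k : Nat} (h : k < t.length)
    (hc : ¬ (c == t[k]) = true) : k ∉ pvOcc t c := by
  intro hk
  have hx' := mem_pvOcc.mp hk
  rw [List.getElem?_eq_getElem h] at hx'
  have heq : t[k] = c := Option.some_inj.mp hx'
  exact hc (by rw [heq]; exact beq_self_eq_true c)

-- binary-search postcondition: all entries left of the result are < start, all from it on are ≥
theorem pvBS_spec (lst : List Nat) (st : Nat)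
    (hsort : ∀ i j, i < j → j < lst.length → lst.getD i 0 < lst.getD j 0) :
    ∀ lo hi, hi ≤ lst.length → lo ≤ hi →
    (∀ j, j < lo → lst.getD j 0 < st) →
    (∀ j, hi ≤ j → j < lst.length → st ≤ lst.getD j 0) →
    lo ≤ pvBS lst st lo hi ∧ pvBS lst st lo hi ≤ hi ∧
    (∀ j, j < pvBS lst st lo hi → lst.getD j 0 < st) ∧
    (∀ j, pvBS lst st lo hi ≤ j → j < lst.length → st ≤ lst.getD j 0) := by
  intro lo hi
  fun_induction pvBS lst st lo hi with
  | case1 lo hi h mid hmid ih =>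
    intro hhi hlohi hlow hhigh
    have hmlt : mid < hi := by omega
    obtain ⟨a, b, c, d⟩ := ih hhi (by omega)
      (fun j hj => by
        rcases Nat.lt_or_ge j mid with hc | hc
        · exact lt_of_lt_of_le (hsort j mid hc (by omega)) (le_of_lt hmid)
        · have : j = mid := by omega
          subst this; exact hmid)
      hhigh
    exact ⟨by omega, b, c, d⟩
  | case2 lo hi h mid hmid ih =>
    intro hhi hlohi hlow hhigh
    push_neg at hmid
    obtain ⟨a, b, c, d⟩ := ih (by omega) (by omega) hlow
      (fun j hj hjlen => by
        rcases Nat.lt_or_ge mid j with hc | hc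
        · exact le_trans hmid (le_of_lt (hsort mid j hc hjlen))
        · have : j = mid := by omega
          subst this; exact hmid)
    exact ⟨a, by omega, c, d⟩
  | case3 lo hi h =>
    intro hhi hlohi hlow hhigh
    exact ⟨le_refl _, hlohi, hlow, fun j hj hjlen => hhigh j (by omega) hjlen⟩

-- first element ≥ k of a list whose first r entries are < k and whose r-th is ≥ k
theorem find?_ge_eq (l : List Nat) (k : Nat) :
    ∀ r, r ≤ l.length →
    (∀ j, j < r → l.getD j 0 < k) →
    (r < l.length → k ≤ l.getD r 0) →
    l.find? (fun i => decide (k ≤ i)) = l[r]? := by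
  induction l with
  | nil => intro r hr _ _; simp_all
  | cons x xs ih =>
    intro r hr hlow hhigh
    cases r with
    | zero =>
      have hx : k ≤ x := by simpa using hhigh (by simp)
      simp [List.find?, hx]
    | succ r' =>
      have hx : x < k := by simpa using hlow 0 (by omega)
      rw [List.find?]
      have : (decide (k ≤ x)) = false := by simp; omega
      rw [this]
      simp only [List.getElem?_cons_succ]
      exact ih r' (by simpa using hr) (fun j hj => by simpa using hlow (j+1) (by omega))
        (fun hlen => by simpa using hhigh (by simpa using hlen))

theorem find?_ge_self (l : List Nat) (k : Nat) (hp : l.Pairwise (· < ·)) (hk : k ∈ l) :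
    l.find? (fun i => decide (k ≤ i)) = some k := by
  induction l with
  | nil => simp at hk
  | cons x xs ih =>
    rcases List.mem_cons.mp hk with rfl | hk'
    · simp [List.find?]
    · have hx : x < k := (List.pairwise_cons.mp hp).1 k hk'
      rw [List.find?]
      have : (decide (k ≤ x)) = false := by simp; omega
      rw [this]
      exact ih (List.pairwise_cons.mp hp).2 hk'

theorem find?_ge_succ (l : List Nat) (k : Nat) (h : ∀ x ∈ l, x ≠ k) :
    l.find? (fun i => decide (k ≤ i)) = l.find? (fun i => decide (k + 1 ≤ i)) := by
  induction l with
  | nil => rfl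
  | cons x xs ih =>
    have hx : x ≠ k := h x (by simp)
    rw [List.find?, List.find?]
    have : (decide (k ≤ x)) = (decide (k + 1 ≤ x)) := by
      by_cases hc : k ≤ x
      · have : k + 1 ≤ x := by omega
        simp [hc, this]
      · have : ¬ (k + 1 ≤ x) := by omega
        simp [hc, this]
    rw [this]
    cases hd : (decide (k + 1 ≤ x)) with
    | true => rfl
    | false => exact ih (fun y hy => h y (by simp [hy]))

-- A's inner loop finds the first index ≥ k whose character is c
theorem pvLoopA_eq (t : List Char) (c : Char) (k : Nat) :
    k < t.length → pvLoopA t c k = (pvOcc t c).find? (fun i => decide (k ≤ i)) := by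
  fun_induction pvLoopA t c k
  case case1 k h temp hc =>
    intro _
    have hk : k ∈ pvOcc t c := mem_pvOcc.mpr (by
      rw [List.getElem?_eq_getElem h]
      exact congrArg some (eq_of_beq hc).symm)
    exact (find?_ge_self _ _ (pvOcc_pairwise t c) hk).symm
  case case2 h temp hc =>
    intro _
    symm
    rw [List.find?_eq_none]
    intro x hx
    simp only [decide_eq_true_eq]
    intro hkx
    have hxlen : x < t.length := pvMem_lt hx
    have : x = t.length - 1 := by omega
    subst this
    exact pvNotMem h hc hx
  case case3 k h temp hc hlast ih =>
    intro _
    rw [ih (by omega)]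
    symm
    apply find?_ge_succ
    intro x hx hxk
    subst hxk
    exact pvNotMem h hc hx
  case case4 k h => intro hk; omega

-- the two main loops agree whenever the (space-stripped) title is nonempty
theorem pvOuter_eq (t : List Char) :
    ∀ (s : List Char) (st : Nat), st < t.length →
      pvOuterA t s st = pvOuterB (pvBuild t) s st := by
  intro s
  induction s with
  | nil => intro st _; rfl
  | cons c rest ih =>
    intro st hst
    simp only [pvOuterA, pvOuterB, pvBuild_getD]
    obtain ⟨hle1, hle2, hlow, hhigh⟩ :=
      pvBS_spec (pvOcc t c) st (pvOcc_sorted t c) 0 (pvOcc t c).length le_rfl (Nat.zero_le _)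
        (fun j hj => absurd hj (Nat.not_lt_zero j))
        (fun j hj hjlen => absurd hjlen (by omega))
    rw [pvLoopA_eq t c st hst,
        find?_ge_eq (pvOcc t c) st (pvBS (pvOcc t c) st 0 (pvOcc t c).length) hle2 hlow
          (fun hlt => hhigh _ le_rfl hlt)]
    by_cases hlo : pvBS (pvOcc t c) st 0 (pvOcc t c).length = (pvOcc t c).length
    · rw [List.getElem?_eq_none (le_of_eq hlo.symm), if_pos hlo]
    · have hlt : pvBS (pvOcc t c) st 0 (pvOcc t c).length < (pvOcc t c).length := by omega
      rw [List.getElem?_eq_getElem hlt, if_neg hlo, List.getD_eq_getElem _ _ hlt]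
      exact ih _ (pvMem_lt (List.getElem_mem hlt))

-- s.replace(" ", "") drops exactly the spaces
theorem goFilter : ∀ (fuel : Nat) (l acc : List Char), l.length ≤ fuel →
    PySem.Chars.replace.go [' '] [] fuel l acc
      = acc.reverse ++ l.filter (fun ch => !(ch == ' ')) := by
  intro fuel
  induction fuel with
  | zero =>
    intro l acc hl
    have : l = [] := List.length_eq_zero_iff.mp (by omega)
    subst this
    simp [PySem.Chars.replace.go]
  | succ n ih =>
    intro l acc hl
    cases l with
    | nil => simp [PySem.Chars.replace.go]
    | cons ch tl =>
      rw [PySem.Chars.replace.go]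
      by_cases hch : ch = ' '
      · subst hch
        have hpre : [' '].isPrefixOf (' ' :: tl) = true := by simp [List.isPrefixOf]
        rw [if_pos hpre]
        simp only [List.length_cons] at hl
        rw [ih _ _ (by simpa using hl)]
        simp
      · have hpre : [' '].isPrefixOf (ch :: tl) = false := by
          simp [List.isPrefixOf]; exact fun h => hch h.symm
        rw [if_neg (by simp [hpre])]
        simp only [List.length_cons] at hl
        rw [ih _ _ (by omega)]
        simp [hch]

theorem pvReplace_toList (x : String) :
    (PySem.Str.replace x " " "").toList = x.toList.filter (fun ch => !(ch == ' ')) := by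
  rw [PySem.Str.toList_replace]
  have h1 : " ".toList = [' '] := by decide
  have h2 : "".toList = ([] : List Char) := by decide
  rw [h1, h2]
  rw [PySem.Chars.replace]
  rw [if_neg (by simp)]
  exact goFilter _ _ _ le_rfl

theorem pvOuterA_nil_title (s : List Char) (st : Nat) : pvOuterA [] s st = 5 := by
  induction s generalizing st with
  | nil => rfl
  | cons c rest ih =>
    simp only [pvOuterA]
    rw [pvLoopA]
    simp only [List.length_nil, Nat.not_lt_zero, dite_false]
    exact ih st

theorem pvOuterB_nil_title (c : Char) (rest : List Char) (st : Nat) :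
    pvOuterB (pvBuild []) (c :: rest) st = 0 := by
  have hb : pvBuild [] = PySem.Dict.empty := rfl
  rw [hb]
  simp only [pvOuterB, PySem.Dict.getD_empty]
  rw [pvBS]
  simp

-- ===== VERDICT (by name: the statement is the Claim_ definition above) =====
theorem same_order_spec : Claim_unchanged_same_order := by
  intro search_term title _hdom hnd
  show pvOuterA (PySem.Str.replace title " " "").toList
      (PySem.Str.replace search_term " " "").toList 0
    = pvOuterB (pvBuild (PySem.Str.replace title " " "").toList)
      (PySem.Str.replace search_term " " "").toList 0
  by_cases hall : title.toList.all (fun ch => ch == ' ') = true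
  · -- the title is all spaces; ¬D forces the search term to be all spaces too
    have hany : ¬ (search_term.toList.any (fun ch => ch != ' ') = true) :=
      fun h => hnd ⟨hall, h⟩
    have hany' : (search_term.toList.any (fun ch => ch != ' ')) = false := by
      cases hx : search_term.toList.any (fun ch => ch != ' ') with
      | false => rfl
      | true => exact absurd hx hany
    have hs : (PySem.Str.replace search_term " " "").toList = [] := by
      rw [pvReplace_toList, List.filter_eq_nil_iff]
      intro a ha
      have := List.any_eq_false.mp hany' a ha
      simpa using this
    rw [hs]
    rfl
  · -- the title has a non-space character, so it is nonempty after stripping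
    have hne : 0 < (PySem.Str.replace title " " "").toList.length := by
      rw [pvReplace_toList]
      have hall' : (title.toList.all (fun ch => ch == ' ')) = false := by
        cases hx : title.toList.all (fun ch => ch == ' ') with
        | false => rfl
        | true => exact absurd hx hall
      rcases List.all_eq_false.mp hall' with ⟨x, hx, hxs⟩
      have : x ∈ title.toList.filter (fun ch => !(ch == ' ')) :=
        List.mem_filter.mpr ⟨hx, by simpa using hxs⟩
      exact List.length_pos_of_mem this
    exact pvOuter_eq _ _ 0 hne

theorem same_order_changed : Claim_changed_same_order := by
  unfold Claim_changed_same_order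
  refine ⟨by decide, by decide, ?_, ?_, by decide⟩
  · show pvOuterA (PySem.Str.replace " " " " "").toList
        (PySem.Str.replace "a" " " "").toList 0 = 5
    have ht : (PySem.Str.replace " " " " "").toList = [] := by
      rw [pvReplace_toList]; decide
    rw [ht]
    exact pvOuterA_nil_title _ 0
  · show pvOuterB (pvBuild (PySem.Str.replace " " " " "").toList)
        (PySem.Str.replace "a" " " "").toList 0 = 0
    have ht : (PySem.Str.replace " " " " "").toList = [] := by
      rw [pvReplace_toList]; decide
    have hs : (PySem.Str.replace "a" " " "").toList = ['a'] := by
      rw [pvReplace_toList]; decide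
    rw [ht, hs]
    exact pvOuterB_nil_title 'a' [] 0

theorem same_order_tight : Claim_exact_same_order := by
  intro search_term title _hdom hD
  obtain ⟨hall, hany⟩ := hD
  have ht : (PySem.Str.replace title " " "").toList = [] := by
    rw [pvReplace_toList, List.filter_eq_nil_iff]
    intro a ha
    simpa using List.all_eq_true.mp hall a ha
  have hs : (PySem.Str.replace search_term " " "").toList ≠ [] := by
    rcases List.any_eq_true.mp hany with ⟨x, hx, hxs⟩
    rw [pvReplace_toList]
    exact List.ne_nil_of_mem (List.mem_filter.mpr ⟨hx, by simpa using hxs⟩)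
  show pvOuterA (PySem.Str.replace title " " "").toList
      (PySem.Str.replace search_term " " "").toList 0
    ≠ pvOuterB (pvBuild (PySem.Str.replace title " " "").toList)
      (PySem.Str.replace search_term " " "").toList 0
  rw [ht]
  obtain ⟨c, rest, hcr⟩ := List.exists_cons_of_ne_nil hs
  rw [hcr, pvOuterA_nil_title, pvOuterB_nil_title]
  decide
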